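-- pv_equiv track=rewrite | github.com/songmilee/bkj.problem | python/bkj/8958.py | solution
-- ===== SOURCE A (Python) =====
-- def solution(s):
--     size = len(s)
--     score = [0] * size
--     total = 0
--
--     for i in range(size):
--         if s[i] == 'O':
--             score[i] = 1
--
--             if i - 1 >= 0 and s[i - 1] == 'O':
--                 score[i] += score[i - 1]
--
--         total += score[i]
--
--     return total
-- ===== SOURCE B (Python) =====
-- def solution(s):
--     # Collect lengths of maximal runs of 'O', then sum the closed-form
--     # triangular score L*(L+1)//2 of each run.
--     runs = []
--     n = 0
--     for c in s:
--         if c == 'O':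
--             n += 1
--         elif n:
--             runs.append(n)
--             n = 0
--     if n:
--         runs.append(n)
--     return sum(L * (L + 1) // 2 for L in runs)
-- ===== Notes on version B (the rewrite author's own statement) =====
-- stated objective: faster
-- what changed: Instead of A's per-index score array with a backward lookup, B extracts the lengths of maximal runs of 'O' and sums the closed-form triangular number L*(L+1)//2 of each run (one cheap counter update per character, arithmetic only once per run).
import Mathlib
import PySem

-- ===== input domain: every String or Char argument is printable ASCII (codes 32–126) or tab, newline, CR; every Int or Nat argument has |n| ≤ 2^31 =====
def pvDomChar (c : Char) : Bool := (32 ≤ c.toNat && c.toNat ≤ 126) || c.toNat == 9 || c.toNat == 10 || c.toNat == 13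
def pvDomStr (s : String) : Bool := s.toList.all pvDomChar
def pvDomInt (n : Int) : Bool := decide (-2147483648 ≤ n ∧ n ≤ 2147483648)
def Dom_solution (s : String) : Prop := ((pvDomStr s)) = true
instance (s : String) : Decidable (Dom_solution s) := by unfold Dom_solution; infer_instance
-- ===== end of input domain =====

-- B replaces A's per-index score array and backward lookup with run-length extraction:
-- it collects the lengths of maximal runs of 'O' and sums the closed-form triangular score
-- L*(L+1)//2 of each run (alternative algorithm, same O(n) time).

-- ===== PORT A =====
-- one iteration of A's loop body (index i): maybe set score[i], then total += score[i]
def solutionStep (cs : List Char) (acc : List Int × Int) (i : Nat) : List Int × Int :=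
  let score := acc.1
  let score' :=
    if cs.getD i ' ' = 'O' then
      score.set i (if 1 ≤ i ∧ cs.getD (i - 1) ' ' = 'O' then 1 + score.getD (i - 1) 0 else 1)
    else score
  (score', acc.2 + score'.getD i 0)

def solution (s : String) : Int :=
  let cs := s.toList
  let size := cs.length
  ((List.range size).foldl (solutionStep cs) (List.replicate size 0, 0)).2

-- ===== PORT B =====
-- loop body of B: state (runs, n); 'O' extends the current run, anything else flushes it
def runStep (acc : List Int × Int) (c : Char) : List Int × Int :=
  if c = 'O' then (acc.1, acc.2 + 1)
  else if acc.2 ≠ 0 then (acc.1 ++ [acc.2], 0) else acc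

-- L * (L + 1) // 2
def pvTri (L : Int) : Int := PySem.Int.floordiv (L * (L + 1)) 2

def solution_alt (s : String) : Int :=
  let p := s.toList.foldl runStep ([], 0)
  let runs := if p.2 ≠ 0 then p.1 ++ [p.2] else p.1
  (runs.map pvTri).foldl (· + ·) 0

-- ===== PRECONDITION & SPEC =====
def Spec_solution (s : String) (out : Int) : Prop := out = solution_alt s
instance (s : String) (out : Int) : Decidable (Spec_solution s out) := by unfold Spec_solution; infer_instance

-- ===== CLAIM (what is proved, stated in full; the proofs are below) =====
def Claim_equal_solution : Prop := ∀ (s : String), Dom_solution s → Spec_solution s (solution s)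

-- ===== LEMMAS AND PROOFS =====

-- proof-only intermediate: the running-streak formulation; state (total, streak)
def streakStep (acc : Int × Int) (c : Char) : Int × Int :=
  if c = 'O' then (acc.1 + (acc.2 + 1), acc.2 + 1) else (acc.1, 0)

-- A's fold over the first n indices equals the streak fold over the first n characters
theorem solution_invariant (cs : List Char) (n : Nat) (hn : n ≤ cs.length) :
    ((List.range n).foldl (solutionStep cs) (List.replicate cs.length 0, 0)).1.length = cs.length
    ∧ (∀ j, n ≤ j → ((List.range n).foldl (solutionStep cs) (List.replicate cs.length 0, 0)).1.getD j 0 = 0)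
    ∧ ((List.range n).foldl (solutionStep cs) (List.replicate cs.length 0, 0)).2
        = ((cs.take n).foldl streakStep (0, 0)).1
    ∧ ((cs.take n).foldl streakStep (0, 0)).2
        = (if 1 ≤ n ∧ cs.getD (n - 1) ' ' = 'O'
           then ((List.range n).foldl (solutionStep cs) (List.replicate cs.length 0, 0)).1.getD (n - 1) 0
           else 0) := by
  induction n with
  | zero =>
      simp
  | succ n ih =>
      have hn' : n ≤ cs.length := Nat.le_of_succ_le hn
      have hlt : n < cs.length := hn
      obtain ⟨hlen, hzero, htot, hstreak⟩ := ih hn'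
      set r := (List.range n).foldl (solutionStep cs) (List.replicate cs.length 0, 0) with hr
      set b := (cs.take n).foldl streakStep (0, 0) with hb
      have hrange : List.range (n + 1) = List.range n ++ [n] := by
        simp [List.range_succ]
      have htake : cs.take (n + 1) = cs.take n ++ [cs.getD n ' '] := by
        rw [List.take_add_one]
        simp [List.getD, List.getElem?_eq_getElem hlt]
      have hfoldA : (List.range (n + 1)).foldl (solutionStep cs) (List.replicate cs.length 0, 0)
          = solutionStep cs r n := by
        rw [hrange, List.foldl_append]; rfl
      have hfoldB : (cs.take (n + 1)).foldl streakStep (0, 0)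
          = streakStep b (cs.getD n ' ') := by
        rw [htake, List.foldl_append]; rfl
      rw [hfoldA, hfoldB]
      simp only [solutionStep, streakStep]
      by_cases hc : cs.getD n ' ' = 'O'
      · rw [if_pos hc, if_pos hc]
        have hv : (if 1 ≤ n ∧ cs.getD (n - 1) ' ' = 'O' then 1 + r.1.getD (n - 1) 0 else 1)
            = b.2 + 1 := by
          by_cases h1 : 1 ≤ n ∧ cs.getD (n - 1) ' ' = 'O'
          · rw [if_pos h1, hstreak, if_pos h1]; ring
          · rw [if_neg h1, hstreak, if_neg h1]; ring
        rw [hv]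
        have hgetset : (r.1.set n (b.2 + 1)).getD n 0 = b.2 + 1 := by
          rw [List.getD, List.getElem?_set_self (by omega : n < r.1.length)]
          rfl
        refine ⟨by simp [hlen], ?_, ?_, ?_⟩
        · intro j hj
          rw [List.getD, List.getElem?_set_ne (by omega : n ≠ j)]
          exact hzero j (by omega)
        · rw [hgetset, htot]
        · have hcond : (1 : Nat) ≤ n + 1 ∧ cs.getD (n + 1 - 1) ' ' = 'O' :=
            ⟨Nat.le_add_left 1 n, by simpa using hc⟩
          rw [if_pos hcond]
          simpa using hgetset.symm
      · rw [if_neg hc, if_neg hc]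
        have hgn : r.1.getD n 0 = 0 := hzero n (le_refl n)
        refine ⟨hlen, ?_, ?_, ?_⟩
        · intro j hj
          exact hzero j (by omega)
        · rw [hgn, htot]; ring
        · have hcond : ¬ ((1 : Nat) ≤ n + 1 ∧ cs.getD (n + 1 - 1) ' ' = 'O') := by
            intro h; exact hc (by simpa using h.2)
          rw [if_neg hcond]

theorem pvTri_zero : pvTri 0 = 0 := by decide

theorem pvTri_succ (k : Int) : pvTri (k + 1) = pvTri k + (k + 1) := by
  obtain ⟨m, hm⟩ := Int.even_mul_succ_self k
  have hm' : k * (k + 1) = 2 * m := by omega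
  have h2 : (k + 1) * (k + 1 + 1) = 2 * m + 2 * (k + 1) := by rw [← hm']; ring
  unfold pvTri
  rw [PySem.Int.floordiv_eq_ediv_of_pos (by norm_num), PySem.Int.floordiv_eq_ediv_of_pos (by norm_num),
      h2, hm']
  omega

-- sum of triangular scores, appending one run
theorem sumTri_append (rs : List Int) (x : Int) :
    ((rs ++ [x]).map pvTri).foldl (· + ·) 0 = (rs.map pvTri).foldl (· + ·) 0 + pvTri x := by
  simp [List.map_append, List.foldl_append]

-- the streak fold equals "sum of flushed runs plus triangular of the open streak"
theorem streak_runs (cs : List Char) :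
    ∀ (rs : List Int) (k t : Int), t = (rs.map pvTri).foldl (· + ·) 0 + pvTri k →
      (cs.foldl streakStep (t, k)).1
        = ((cs.foldl runStep (rs, k)).1.map pvTri).foldl (· + ·) 0
          + pvTri (cs.foldl runStep (rs, k)).2
      ∧ (cs.foldl streakStep (t, k)).2 = (cs.foldl runStep (rs, k)).2 := by
  induction cs with
  | nil => intro rs k t h; exact ⟨h, rfl⟩
  | cons c cs ih =>
      intro rs k t h
      simp only [List.foldl_cons]
      by_cases hc : c = 'O'
      · simp only [streakStep, runStep, if_pos hc]
        exact ih rs (k + 1) (t + (k + 1)) (by rw [pvTri_succ]; omega)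
      · simp only [streakStep, runStep, if_neg hc]
        by_cases hk : k ≠ 0
        · rw [if_pos hk]
          exact ih (rs ++ [k]) 0 t (by rw [sumTri_append, pvTri_zero]; omega)
        · rw [if_neg hk]
          push Not at hk
          subst hk
          exact ih rs 0 t (by simpa using h)

-- ===== VERDICT (by name: the statement is the Claim_ definition above) =====
theorem solution_spec : Claim_equal_solution := by
  intro s _
  show solution s = solution_alt s
  unfold solution solution_alt
  have hA := (solution_invariant s.toList s.toList.length (le_refl _)).2.2.1
  rw [List.take_length] at hA
  have hB := streak_runs s.toList [] 0 0 (by simp [pvTri_zero])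
  simp only at hA hB ⊢
  rw [hA, hB.1]
  by_cases hz : (s.toList.foldl runStep ([], 0)).2 ≠ 0
  · rw [if_pos hz, sumTri_append]
  · rw [if_neg hz]
    push Not at hz
    rw [hz, pvTri_zero, add_zero]
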